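-- pv_equiv track=rewrite | github.com/zjohnsilver/college-codes | ProgramasPython/Trabalhando com Imagem/python_work_imagem.py | espelhar
-- ===== SOURCE A (Python) =====
-- def espelhar(lista, linhas, colunas):
--     k = 0
--     matriz = []
--     for i in range(linhas):
--         matriz.append([])
--     for i in range(linhas):
--         for j in range(colunas):
--             matriz[i].append(0)
--
--     for i in range(linhas):
--         for j in range(colunas-1,-1,-1):
--             matriz[i][j] = lista[k]
--             k += 1
--     return matriz
-- ===== SOURCE B (Python) =====
-- def espelhar(lista, linhas, colunas):
--     matriz = [[lista[i * colunas + j] for j in range(colunas)] for i in range(linhas)]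
--     for fila in matriz:
--         e, d = 0, len(fila) - 1
--         while e < d:
--             fila[e], fila[d] = fila[d], fila[e]
--             e += 1
--             d -= 1
--     return matriz
-- ===== Notes on version B (the rewrite author's own statement) =====
-- stated objective: alternative
-- what changed: B builds each row as a direct left-to-right chunk of the list and then mirrors it in place with a two-pointer swap loop, instead of A's two zero-preallocation passes followed by writing into reversed column slots driven by a running flat counter.
import Mathlib
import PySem

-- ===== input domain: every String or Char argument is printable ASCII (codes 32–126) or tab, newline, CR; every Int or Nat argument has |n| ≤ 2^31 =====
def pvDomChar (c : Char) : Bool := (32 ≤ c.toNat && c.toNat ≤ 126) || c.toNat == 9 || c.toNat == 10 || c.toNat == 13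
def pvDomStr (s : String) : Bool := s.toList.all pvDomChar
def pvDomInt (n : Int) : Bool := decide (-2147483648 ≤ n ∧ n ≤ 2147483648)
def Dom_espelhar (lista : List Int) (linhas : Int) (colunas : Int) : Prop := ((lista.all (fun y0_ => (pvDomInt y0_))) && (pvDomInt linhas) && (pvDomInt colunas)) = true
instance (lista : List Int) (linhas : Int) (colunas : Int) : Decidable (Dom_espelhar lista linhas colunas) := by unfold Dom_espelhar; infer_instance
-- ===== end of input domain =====

-- B gathers each row as a direct chunk of the list and mirrors it in place with a
-- two-pointer swap loop, instead of A's zero-preallocation passes plus writing into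
-- reversed slots with a running counter (objective: alternative, same asymptotic cost).

-- ===== PORT A =====
-- matriz[i][j] = v  (A only reaches this with nonnegative in-range i, j, so .toNat indexing is exact)
def pvPut (m : List (List Int)) (i j : Int) (v : Int) : List (List Int) :=
  m.set i.toNat ((m.getD i.toNat []).set j.toNat v)

-- matriz[i].append(0)
def pvZero (m : List (List Int)) (i : Int) : List (List Int) :=
  m.set i.toNat ((m.getD i.toNat []) ++ [0])

-- body of A's fill loop: matriz[i][j] = lista[k]; k += 1  (pyGet? none = IndexError, excluded by Pre_)
def pvFillA (lista : List Int) (i : Int) (st : List (List Int) × Int) (j : Int) : List (List Int) × Int :=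
  (pvPut st.1 i j ((PySem.List.pyGet? lista st.2).getD 0), st.2 + 1)

def espelhar (lista : List Int) (linhas : Int) (colunas : Int) : List (List Int) :=
  let matriz : List (List Int) := (PySem.List.pyRange 0 linhas 1).foldl (fun m _ => m ++ [[]]) []
  let matriz := (PySem.List.pyRange 0 linhas 1).foldl
      (fun m i => (PySem.List.pyRange 0 colunas 1).foldl (fun m _ => pvZero m i) m) matriz
  let st := (PySem.List.pyRange 0 linhas 1).foldl
      (fun st i => (PySem.List.pyRange (colunas - 1) (-1) (-1)).foldl (pvFillA lista i) st)
      (matriz, (0 : Int))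
  st.1

-- ===== PORT B =====
-- the while loop 'fila[e], fila[d] = fila[d], fila[e]; e += 1; d -= 1' (the loop only runs
-- with 0 ≤ e < d < len(fila), so .toNat indexing and the getD/set accesses are exact)
def pvSwapRev (fila : List Int) (e d : Int) : List Int :=
  if e < d then
    pvSwapRev ((fila.set e.toNat (fila.getD d.toNat 0)).set d.toNat (fila.getD e.toNat 0)) (e + 1) (d - 1)
  else fila
termination_by (d - e).toNat
decreasing_by omega

def espelhar_alt (lista : List Int) (linhas : Int) (colunas : Int) : List (List Int) :=
  let matriz := (PySem.List.pyRange 0 linhas 1).map (fun i =>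
    (PySem.List.pyRange 0 colunas 1).map (fun j => (PySem.List.pyGet? lista (i * colunas + j)).getD 0))
  matriz.map (fun fila => pvSwapRev fila 0 ((fila.length : Int) - 1))

-- ===== PRECONDITION & SPEC =====
-- Pre_ excludes exactly the inputs on which A raises IndexError (lista shorter than the
-- linhas*colunas cells the fill loop reads); B raises IndexError there as well.
def Pre_espelhar (lista : List Int) (linhas : Int) (colunas : Int) : Prop :=
  0 < linhas → 0 < colunas → linhas * colunas ≤ (lista.length : Int)
instance (lista : List Int) (linhas : Int) (colunas : Int) : Decidable (Pre_espelhar lista linhas colunas) := by unfold Pre_espelhar; infer_instance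

def pvWitness_espelhar : List Int × Int × Int := ([1, 2, 3, 4, 5, 6], 2, 3)

def Spec_espelhar (lista : List Int) (linhas : Int) (colunas : Int) (out : List (List Int)) : Prop := out = espelhar_alt lista linhas colunas
instance (lista : List Int) (linhas : Int) (colunas : Int) (out : List (List Int)) : Decidable (Spec_espelhar lista linhas colunas out) := by unfold Spec_espelhar; infer_instance

-- ===== CLAIM (what is proved, stated in full; the proofs are below) =====
def Claim_equal_espelhar : Prop := ∀ (lista : List Int) (linhas : Int) (colunas : Int), Dom_espelhar lista linhas colunas → Pre_espelhar lista linhas colunas → Spec_espelhar lista linhas colunas (espelhar lista linhas colunas)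

-- ===== LEMMAS AND PROOFS =====

-- lista[k] (with IndexError mapped to 0; Pre_ keeps all reads in range)
def pvLget (lista : List Int) (k : Int) : Int := (PySem.List.pyGet? lista k).getD 0

-- the mirrored row i of the final matrix
def pvMrow (lista : List Int) (c i : Int) : List Int :=
  (List.range c.toNat).map (fun j : Nat => pvLget lista (i * c + (c - 1 - (j : Int))))

theorem pvSwapRev_length : ∀ (fila : List Int) (e d : Int), (pvSwapRev fila e d).length = fila.length := by
  intro fila e d
  fun_induction pvSwapRev fila e d with
  | case1 fila e d h ih => simpa using ih
  | case2 => rfl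

theorem pvSwapRev_getD (fila : List Int) (e d : Int) :
    0 ≤ e → d < (fila.length : Int) →
    ∀ j : Nat, (pvSwapRev fila e d).getD j 0 =
      if e ≤ (j : Int) ∧ (j : Int) ≤ d then fila.getD (e + d - (j : Int)).toNat 0 else fila.getD j 0 := by
  fun_induction pvSwapRev fila e d with
  | case1 fila e d h ih =>
    intro he hd j
    have hlen : ((fila.set e.toNat (fila.getD d.toNat 0)).set d.toNat (fila.getD e.toNat 0)).length
        = fila.length := by simp
    rw [ih (by omega) (by rw [hlen]; omega) j]
    have hfd : ∀ x : Nat, ((fila.set e.toNat (fila.getD d.toNat 0)).set d.toNat (fila.getD e.toNat 0)).getD x 0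
        = if (x : Int) = d then fila.getD e.toNat 0
          else if (x : Int) = e then fila.getD d.toNat 0 else fila.getD x 0 := by
      intro x
      have hdl : d.toNat < fila.length := by omega
      have hel : e.toNat < fila.length := by omega
      simp only [List.getD_eq_getElem?_getD, List.getElem?_set, List.length_set]
      split_ifs <;> simp_all <;> omega
    by_cases h1 : e + 1 ≤ (j : Int) ∧ (j : Int) ≤ d - 1
    · rw [if_pos h1, hfd]
      rw [if_neg (by omega), if_neg (by omega), if_pos (by omega : e ≤ (j : Int) ∧ (j : Int) ≤ d)]
      congr 1
      omega
    · rw [if_neg h1, hfd]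
      by_cases h2 : (j : Int) = d
      · rw [if_pos h2, if_pos (by omega : e ≤ (j : Int) ∧ (j : Int) ≤ d)]
        congr 1
        omega
      · rw [if_neg h2]
        by_cases h3 : (j : Int) = e
        · rw [if_pos h3, if_pos (by omega : e ≤ (j : Int) ∧ (j : Int) ≤ d)]
          congr 1
          omega
        · rw [if_neg h3, if_neg (by omega : ¬(e ≤ (j : Int) ∧ (j : Int) ≤ d))]
  | case2 fila e d h =>
    intro he hd j
    split_ifs with hij
    · congr 1
      omega
    · rfl

theorem pvSwapRev_reverse (l : List Int) : pvSwapRev l 0 ((l.length : Int) - 1) = l.reverse := by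
  apply List.ext_getElem
  · rw [pvSwapRev_length, List.length_reverse]
  · intro j hj1 hj2
    have hj : j < l.length := by rw [pvSwapRev_length] at hj1; exact hj1
    have hg := pvSwapRev_getD l 0 ((l.length : Int) - 1) le_rfl (by omega) j
    rw [if_pos (by omega : (0 : Int) ≤ (j : Int) ∧ (j : Int) ≤ (l.length : Int) - 1)] at hg
    have ht : ((0 : Int) + ((l.length : Int) - 1) - (j : Int)).toNat = l.length - 1 - j := by omega
    rw [ht] at hg
    rw [← List.getD_eq_getElem (pvSwapRev l 0 ((l.length : Int) - 1)) 0 hj1, hg,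
      List.getD_eq_getElem l 0 (by omega), List.getElem_reverse]

theorem pvRevMapRange (n : Nat) (g : Nat → Int) :
    ((List.range n).map g).reverse = (List.range n).map (fun j => g (n - 1 - j)) := by
  apply List.ext_getElem
  · simp
  · intro j h1 h2
    simp [List.getElem_reverse]

-- reversing B's chunk of row i gives the mirrored row
theorem pvChunk_reverse (lista : List Int) (c i : Int) :
    ((PySem.List.pyRange 0 c 1).map (fun j => (PySem.List.pyGet? lista (i * c + j)).getD 0)).reverse
      = pvMrow lista c i := by
  rw [PySem.List.pyRange_one, List.map_map, pvRevMapRange]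
  unfold pvMrow pvLget
  rw [show ((c : Int) - 0).toNat = c.toNat from by omega]
  apply List.map_congr_left
  intro j hj
  have hj' : j < c.toNat := List.mem_range.mp hj
  simp only [Function.comp]
  congr 2
  omega

-- B's matrix row i is the mirrored chunk pvMrow
theorem pvAlt_eq_map (lista : List Int) (linhas colunas : Int) :
    espelhar_alt lista linhas colunas
      = (PySem.List.pyRange 0 linhas 1).map (fun i => pvMrow lista colunas i) := by
  simp only [espelhar_alt]
  rw [List.map_map]
  apply List.map_congr_left
  intro i _
  simp only [Function.comp]
  rw [pvSwapRev_reverse, pvChunk_reverse]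

-- A's phase 1: linhas empty rows
theorem pvPhase1 (linhas : Int) :
    List.foldl (fun m _ => m ++ [[]]) ([] : List (List Int)) (PySem.List.pyRange 0 linhas 1)
      = List.replicate linhas.toNat [] := by
  simp [PySem.List.foldl_append_singleton_eq_map (fun (_ : Int) => ([] : List Int))
    (PySem.List.pyRange 0 linhas 1) [], List.map_const', PySem.List.length_pyRange_one]

theorem pvZero_chunk : ∀ (l : List Int) (m : List (List Int)) (i : Int),
    List.foldl (fun m (_ : Int) => pvZero m i) m l
      = m.set i.toNat ((m.getD i.toNat []) ++ List.replicate l.length 0) := by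
  intro l
  induction l with
  | nil =>
    intro m i
    by_cases h : i.toNat < m.length
    · simp only [List.foldl_nil, List.length_nil, List.replicate_zero, List.append_nil,
        List.getD_eq_getElem?_getD, List.getElem?_eq_getElem h, Option.getD_some,
        List.set_getElem_self]
    · simp [List.set_eq_of_length_le (by omega : m.length ≤ i.toNat)]
  | cons a l ih =>
    intro m i
    rw [List.foldl_cons, ih (pvZero m i) i]
    by_cases h : i.toNat < m.length
    · have hget : (pvZero m i).getD i.toNat [] = (m.getD i.toNat []) ++ [0] := by
        simp [pvZero, List.getD_eq_getElem?_getD, h]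
      rw [hget]
      show (m.set i.toNat _).set i.toNat _ = _
      rw [List.set_set]
      congr 1
      simp [List.replicate_succ, List.append_assoc]
    · have h' : m.length ≤ i.toNat := by omega
      have hz : pvZero m i = m := by simp [pvZero, List.set_eq_of_length_le h']
      rw [hz, List.set_eq_of_length_le h', List.set_eq_of_length_le h']

-- A's phase 2: every row becomes colunas zeros
theorem pvPhase2 (colunas : Int) : ∀ (d r : Nat),
    List.foldl (fun m (i : Int) => List.foldl (fun m _ => pvZero m i) m (PySem.List.pyRange 0 colunas 1))
        (List.replicate r (List.replicate colunas.toNat 0) ++ List.replicate d ([] : List Int))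
        (PySem.List.pyRange (r : Int) ((r : Int) + (d : Int)) 1)
      = List.replicate (r + d) (List.replicate colunas.toNat (0 : Int)) := by
  intro d
  induction d with
  | zero =>
    intro r
    rw [PySem.List.pyRange_one_eq_nil (show (r : Int) + ((0 : Nat) : Int) ≤ (r : Int) by omega)]
    simp
  | succ d ih =>
    intro r
    rw [PySem.List.pyRange_one_cons (by omega : (r : Int) < (r : Int) + ((d + 1 : Nat) : Int))]
    rw [List.foldl_cons, pvZero_chunk]
    have hg : ((List.replicate r (List.replicate colunas.toNat 0) ++ List.replicate (d + 1) ([] : List Int)).getD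
        ((r : Int)).toNat []) = [] := by
      rw [List.replicate_succ]
      simp
    have hlen : (PySem.List.pyRange 0 colunas 1).length = colunas.toNat := by
      simp [PySem.List.length_pyRange_one]
    have hset : ((List.replicate r (List.replicate colunas.toNat 0) ++ List.replicate (d + 1) ([] : List Int)).set
          ((r : Int)).toNat (List.replicate colunas.toNat 0))
        = List.replicate (r + 1) (List.replicate colunas.toNat 0) ++ List.replicate d ([] : List Int) := by
      rw [List.replicate_succ]
      simp [List.replicate_succ' (n := r)]
    rw [hg, hlen, List.nil_append, hset]
    have harg2 : ((r : Int) + ((d + 1 : Nat) : Int)) = ((r + 1 : Nat) : Int) + (d : Int) := by push_cast; ring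
    have harg : ((r : Int) + 1) = ((r + 1 : Nat) : Int) := by push_cast; ring
    rw [harg2, harg, ih (r + 1)]
    congr 1
    omega

-- A's inner fill loop on row i, counting t remaining slots (j = t-1 … 0)
theorem pvInner (lista : List Int) (c i : Int) (hc : 0 < c) :
    ∀ (t : Nat), (t : Int) ≤ c → ∀ (m : List (List Int)),
      i.toNat < m.length → (m.getD i.toNat []).length = c.toNat →
      List.foldl (pvFillA lista i) (m, i * c + (c - (t : Int))) (PySem.List.pyRange ((t : Int) - 1) (-1) (-1))
        = (m.set i.toNat
            ((List.range t).map (fun j : Nat => pvLget lista (i * c + (c - 1 - (j : Int))))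
              ++ (m.getD i.toNat []).drop t),
           i * c + c) := by
  intro t
  induction t with
  | zero =>
    intro _ m him hrm
    rw [PySem.List.pyRange_neg_one_eq_nil (by norm_num : ((0 : Nat) : Int) - 1 ≤ -1)]
    simp only [List.foldl_nil, Nat.cast_zero, sub_zero, List.range_zero, List.map_nil,
      List.nil_append, List.drop_zero]
    have hm : m.set i.toNat (m.getD i.toNat []) = m := by
      rw [List.getD_eq_getElem?_getD, List.getElem?_eq_getElem him]
      simp [List.set_getElem_self]
    rw [hm]
  | succ t ih =>
    intro ht m him hrm
    have hcast : ((t + 1 : Nat) : Int) - 1 = (t : Int) := by push_cast; ring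
    rw [hcast, PySem.List.pyRange_neg_one_cons (by omega : (-1 : Int) < (t : Int)), List.foldl_cons]
    have htc : t < c.toNat := by omega
    set r := m.getD i.toNat [] with hr
    set v := pvLget lista (i * c + (c - ((t + 1 : Nat) : Int))) with hv
    have hstep : pvFillA lista i (m, i * c + (c - ((t + 1 : Nat) : Int))) (t : Int)
        = (m.set i.toNat (r.set t v), i * c + (c - (t : Int))) := by
      simp only [pvFillA, pvPut, ← hr, Int.toNat_natCast]
      refine Prod.ext rfl ?_
      push_cast
      ring
    rw [hstep]
    have hget' : (m.set i.toNat (r.set t v)).getD i.toNat [] = r.set t v := by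
      rw [List.getD_eq_getElem?_getD, List.getElem?_set_self (by simpa using him)]
      rfl
    rw [ih (by omega) (m.set i.toNat (r.set t v)) (by simpa using him) (by rw [hget']; simpa using hrm)]
    rw [hget', List.set_set]
    have hdrop : (r.set t v).drop t = v :: r.drop (t + 1) := by
      have h1 : r.drop t = r[t]'(by omega) :: r.drop (t + 1) := List.drop_eq_getElem_cons (by omega)
      rw [List.drop_set, if_neg (by omega), Nat.sub_self, h1, List.set_cons_zero]
    have hvf : v = pvLget lista (i * c + (c - 1 - (t : Int))) := by
      rw [hv]
      congr 2
      push_cast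
      ring
    rw [hdrop, hvf, List.range_succ, List.map_append, List.append_assoc]
    simp only [List.map_cons, List.map_nil, List.cons_append, List.nil_append]

theorem pvSetAtLen {α : Type} (l1 : List α) (x : α) (tl : List α) (v : α) (n : Nat)
    (h : n = l1.length) : (l1 ++ x :: tl).set n v = l1 ++ v :: tl := by
  subst h
  induction l1 with
  | nil => rfl
  | cons a l ih => simp [ih]

-- A's outer fill loop: rows r … r+d-1
theorem pvOuter (lista : List Int) (c : Int) (hc : 0 < c) :
    ∀ (d r : Nat),
    List.foldl (fun st (i : Int) => List.foldl (pvFillA lista i) st (PySem.List.pyRange (c - 1) (-1) (-1)))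
        ((List.range r).map (fun i : Nat => pvMrow lista c (i : Int))
           ++ List.replicate d (List.replicate c.toNat 0), (r : Int) * c)
        (PySem.List.pyRange (r : Int) ((r : Int) + (d : Int)) 1)
      = ((List.range (r + d)).map (fun i : Nat => pvMrow lista c (i : Int)), ((r : Int) + (d : Int)) * c) := by
  intro d
  induction d with
  | zero =>
    intro r
    rw [PySem.List.pyRange_one_eq_nil (by omega : (r : Int) + ((0 : Nat) : Int) ≤ (r : Int))]
    simp
  | succ d ih =>
    intro r
    rw [PySem.List.pyRange_one_cons (by omega : (r : Int) < (r : Int) + ((d + 1 : Nat) : Int)),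
      List.foldl_cons]
    have hct : ((c.toNat : Nat) : Int) = c := Int.toNat_of_nonneg hc.le
    set m := (List.range r).map (fun i : Nat => pvMrow lista c (i : Int))
        ++ List.replicate (d + 1) (List.replicate c.toNat (0 : Int)) with hm
    have him : ((r : Int)).toNat < m.length := by
      simp [hm, Int.toNat_natCast]
    have hgd : m.getD ((r : Int)).toNat [] = List.replicate c.toNat (0 : Int) := by
      rw [Int.toNat_natCast, List.getD_eq_getElem?_getD,
        List.getElem?_append_right (by simp : ((List.range r).map (fun i : Nat => pvMrow lista c (i : Int))).length ≤ r)]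
      simp
    have hrm : (m.getD ((r : Int)).toNat []).length = c.toNat := by
      rw [hgd]
      simp
    have hin := pvInner lista c (r : Int) hc c.toNat (by omega) m him hrm
    rw [hct] at hin
    rw [show (r : Int) * c + (c - c) = (r : Int) * c from by ring] at hin
    rw [hin, hgd, List.drop_replicate, Nat.sub_self, List.replicate_zero, List.append_nil]
    have hset : m.set ((r : Int)).toNat ((List.range c.toNat).map (fun j : Nat => pvLget lista ((r : Int) * c + (c - 1 - (j : Int)))))
        = (List.range (r + 1)).map (fun i : Nat => pvMrow lista c (i : Int))
            ++ List.replicate d (List.replicate c.toNat (0 : Int)) := by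
      rw [Int.toNat_natCast, hm, List.replicate_succ,
        pvSetAtLen _ _ _ _ _ (by simp), List.range_succ, List.map_append]
      simp [pvMrow]
    rw [hset]
    have he1 : (r : Int) * c + c = ((r + 1 : Nat) : Int) * c := by push_cast; ring
    have he2 : (r : Int) + 1 = ((r + 1 : Nat) : Int) := by push_cast; ring
    have he3 : (r : Int) + ((d + 1 : Nat) : Int) = ((r + 1 : Nat) : Int) + (d : Int) := by push_cast; ring
    rw [he1, he2, he3, ih (r + 1)]
    have he4 : r + 1 + d = r + (d + 1) := by omega
    rw [he4]

theorem pvRange_toNat (x : Int) :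
    PySem.List.pyRange 0 x 1 = PySem.List.pyRange 0 (x.toNat : Int) 1 := by
  by_cases h : 0 ≤ x
  · rw [Int.toNat_of_nonneg h]
  · rw [PySem.List.pyRange_one_eq_nil (show x ≤ 0 by omega),
      PySem.List.pyRange_one_eq_nil (show ((x.toNat : Nat) : Int) ≤ 0 by omega)]

theorem espelhar_eq (lista : List Int) (linhas colunas : Int) :
    espelhar lista linhas colunas = espelhar_alt lista linhas colunas := by
  rw [pvAlt_eq_map]
  simp only [espelhar]
  have h12 : List.foldl
      (fun m (i : Int) => List.foldl (fun m _ => pvZero m i) m (PySem.List.pyRange 0 colunas 1))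
      (List.foldl (fun m _ => m ++ [[]]) ([] : List (List Int)) (PySem.List.pyRange 0 linhas 1))
      (PySem.List.pyRange 0 linhas 1)
      = List.replicate linhas.toNat (List.replicate colunas.toNat 0) := by
    rw [pvPhase1, pvRange_toNat linhas]
    simpa using pvPhase2 colunas linhas.toNat 0
  rw [h12]
  by_cases hl : linhas ≤ 0
  · rw [pvRange_toNat linhas, show linhas.toNat = 0 from by omega,
      PySem.List.pyRange_one_eq_nil (by simp)]
    simp
  · by_cases hcol : colunas ≤ 0
    · rw [PySem.List.pyRange_neg_one_eq_nil (by omega : colunas - 1 ≤ -1)]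
      simp only [List.foldl_nil, List.foldl_fixed]
      rw [show colunas.toNat = 0 from by omega]
      simp [pvMrow, show colunas.toNat = 0 from by omega, List.map_const',
        PySem.List.length_pyRange_one]
    · have hcol' : 0 < colunas := by omega
      have hln : ((linhas.toNat : Nat) : Int) = linhas := Int.toNat_of_nonneg (by omega)
      have houter := pvOuter lista colunas hcol' linhas.toNat 0
      simp only [Nat.cast_zero, zero_mul, zero_add, List.range_zero, List.map_nil,
        List.nil_append, hln] at houter
      rw [houter]
      rw [PySem.List.pyRange_one, List.map_map]
      rw [show (linhas - 0).toNat = linhas.toNat from by omega]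
      apply List.map_congr_left
      intro j _
      simp [Function.comp]

-- ===== VERDICT (by name: the statement is the Claim_ definition above) =====
theorem espelhar_spec : Claim_equal_espelhar := by
  intro lista linhas colunas _ _
  unfold Spec_espelhar
  exact espelhar_eq lista linhas colunas
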